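-- pv_equiv track=rewrite | github.com/ProtikDey/foobar | Level 2/foobar_2_2.py | process_parents
-- ===== SOURCE A (Python) =====
-- def process_parents(max_idx, converter):
--     if max_idx < converter:
--         return -1
--     else:
--         node_offset = 0
--         subtree_size = max_idx
--         result = -1
--
--         while subtree_size>0:
--             subtree_size = subtree_size >> 1
--
--             left_node = node_offset + subtree_size
--             right_node = left_node + subtree_size
--             my_node = right_node + 1
--
--             if (left_node == converter) or (right_node == converter):
--                 result = my_node
--
--             if (converter > left_node):
--                 node_offset = left_node
--
--         return result
-- ===== SOURCE B (Python) =====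
-- def process_parents(max_idx, converter):
--     if max_idx < converter:
--         return -1
--
--     def helper(offset, size):
--         if size <= 0:
--             return -1
--         half = size >> 1
--         left = offset + half
--         right = left + half
--         deeper = helper(left if converter > left else offset, half)
--         if deeper != -1:
--             return deeper
--         return right + 1 if (left == converter or right == converter) else -1
--
--     return helper(0, max_idx)
-- ===== Notes on version B (the rewrite author's own statement) =====
-- stated objective: alternative
-- what changed: Replaces the imperative while-loop with a mutable last-match accumulator by a recursive descent over the implicit tree whose deeper result takes priority, returning directly instead of overwriting a result variable.
import Mathlib
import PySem

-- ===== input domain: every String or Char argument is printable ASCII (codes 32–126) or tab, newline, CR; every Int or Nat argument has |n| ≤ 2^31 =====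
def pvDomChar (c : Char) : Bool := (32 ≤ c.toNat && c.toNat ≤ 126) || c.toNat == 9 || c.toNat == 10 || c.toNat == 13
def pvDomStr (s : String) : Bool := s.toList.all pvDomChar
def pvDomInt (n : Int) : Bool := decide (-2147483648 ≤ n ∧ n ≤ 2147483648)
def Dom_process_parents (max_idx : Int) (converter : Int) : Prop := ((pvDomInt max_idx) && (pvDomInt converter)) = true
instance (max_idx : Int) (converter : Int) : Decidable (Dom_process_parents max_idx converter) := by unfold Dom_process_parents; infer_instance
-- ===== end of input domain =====

-- B replaces A's while-loop with a last-match accumulator by a recursive descent over the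
-- implicit tree in which the deeper result takes priority (objective: alternative decomposition).

-- termination helper for both recursions (cited by decreasing_by)
theorem pp_half_lt {size : Int} (h : 0 < size) :
    0 ≤ PySem.Int.floordiv size 2 ∧ (PySem.Int.floordiv size 2).toNat < size.toNat := by
  rw [PySem.Int.floordiv_eq_ediv_of_pos (by omega : (0:Int) < 2)]
  omega

-- ===== PORT A =====
-- the while-loop of A; `subtree_size >> 1` on a positive int is floor division by 2
def ppLoop (converter node_offset subtree_size result : Int) : Int :=
  if h : 0 < subtree_size then
    let s := PySem.Int.floordiv subtree_size 2
    let left_node := node_offset + s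
    let right_node := left_node + s
    let my_node := right_node + 1
    let result' := if left_node = converter ∨ right_node = converter then my_node else result
    let node_offset' := if converter > left_node then left_node else node_offset
    ppLoop converter node_offset' s result'
  else result
termination_by subtree_size.toNat
decreasing_by exact (pp_half_lt h).2

def process_parents (max_idx : Int) (converter : Int) : Int :=
  if max_idx < converter then -1
  else ppLoop converter 0 max_idx (-1)

-- ===== PORT B =====
-- B's recursive helper; `size >> 1` on a positive int is floor division by 2
def ppHelper (converter offset size : Int) : Int :=
  if h : size ≤ 0 then -1
  else
    let half := PySem.Int.floordiv size 2
    let left := offset + half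
    let right := left + half
    let deeper := ppHelper converter (if converter > left then left else offset) half
    if deeper ≠ -1 then deeper
    else if left = converter ∨ right = converter then right + 1 else -1
termination_by size.toNat
decreasing_by exact (pp_half_lt (by omega)).2

def process_parents_alt (max_idx : Int) (converter : Int) : Int :=
  if max_idx < converter then -1
  else ppHelper converter 0 max_idx

-- ===== PRECONDITION & SPEC =====
def Spec_process_parents (max_idx : Int) (converter : Int) (out : Int) : Prop := out = process_parents_alt max_idx converter
instance (max_idx : Int) (converter : Int) (out : Int) : Decidable (Spec_process_parents max_idx converter out) := by unfold Spec_process_parents; infer_instance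

-- ===== CLAIM (what is proved, stated in full; the proofs are below) =====
def Claim_equal_process_parents : Prop := ∀ (max_idx : Int) (converter : Int), Dom_process_parents max_idx converter → Spec_process_parents max_idx converter (process_parents max_idx converter)

-- ===== LEMMAS AND PROOFS =====

-- the loop with accumulator `result` equals the deeper-first recursion, with `result`
-- surviving exactly when the recursion finds no match
theorem pp_key (converter offset size result : Int) (ho : 0 ≤ offset) :
    ppLoop converter offset size result =
      if ppHelper converter offset size = -1 then result
      else ppHelper converter offset size := by
  rw [ppLoop, ppHelper]
  by_cases h : 0 < size
  · have hs := pp_half_lt h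
    simp only [dif_pos h, dif_neg (by omega : ¬ size ≤ 0)]
    set s := PySem.Int.floordiv size 2 with hsdef
    have ho' : 0 ≤ (if converter > offset + s then offset + s else offset) := by
      split <;> omega
    rw [pp_key converter _ s _ ho']
    by_cases hd : ppHelper converter (if converter > offset + s then offset + s else offset) s = -1
    · simp only [hd, ne_eq, not_true_eq_false, if_false]
      by_cases hm : offset + s = converter ∨ offset + s + s = converter
      · simp only [if_pos hm]
        have : ¬ (offset + s + s + 1 = -1) := by omega
        simp [this]
      · simp [hm]
    · simp [hd]
  · simp only [dif_neg h, dif_pos (by omega : size ≤ 0)]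
    simp
termination_by size.toNat
decreasing_by exact (pp_half_lt h).2

-- ===== VERDICT (by name: the statement is the Claim_ definition above) =====
theorem process_parents_spec : Claim_equal_process_parents := by
  intro max_idx converter _
  unfold Spec_process_parents process_parents process_parents_alt
  by_cases h : max_idx < converter
  · simp [h]
  · simp only [if_neg h]
    rw [pp_key converter 0 max_idx (-1) le_rfl]
    split <;> simp_all
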